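-- pv_equiv track=rewrite | github.com/kastryulya/Differentiation | Differentiation.py | get_args_for_operations
-- ===== SOURCE A (Python) =====
-- operations = ['+', '-', '*', '/', '^', 'sin', 'cos', 'log', 'ln', 'tg', 'ctg',
--               'arcsin', 'arccos', 'arctg', 'arcctg', '(', ')']
--
-- bin_func = ['+', '-', '*', '/', '^', 'log']
--
-- def get_args_for_operations(args):
--     if not args:
--         return []
--     index_of_second_operand = 0
--     n = 0
--     previous_operations_flag = False
--
--     for i in range(2, len(args) + 1):
--         if args[-i] in operations:
--             if previous_operations_flag:
--                 n -= 1
--             n += 2 if args[-i] in bin_func else 1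
--             previous_operations_flag = True
--         else:
--             if n == 0:
--                 index_of_second_operand = -i
--                 break
--             n -= 1
--         if n == 0:
--             index_of_second_operand = -i
--             break
--
--     return args[:index_of_second_operand], args[index_of_second_operand:-1], args[-1]
-- ===== SOURCE B (Python) =====
-- operations = ['+', '-', '*', '/', '^', 'sin', 'cos', 'log', 'ln', 'tg', 'ctg',
--               'arcsin', 'arccos', 'arctg', 'arcctg', '(', ')']
--
-- bin_func = ['+', '-', '*', '/', '^', 'log']
--
-- def get_args_for_operations(args):
--     if not args:
--         return []
--     rev = args[::-1]
--     last, rest = rev[0], rev[1:]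
--
--     def consume(ts):
--         # consume one complete RPN subexpression from the front of the
--         # reversed token stream; return the remaining suffix, or None
--         # if the stream runs out before the subexpression completes.
--         if not ts:
--             return None
--         t, tail = ts[0], ts[1:]
--         if t not in operations:
--             return tail
--         r = consume(tail)
--         if r is None:
--             return None
--         return consume(r) if t in bin_func else r
--
--     r = consume(rest)
--     if r is None:
--         r = []  # subexpression never completed: split at index 0
--     k = len(rest) - len(r)
--     return r[::-1], rest[:k][::-1], last
-- ===== Notes on version B (the rewrite author's own statement) =====
-- stated objective: alternative
-- what changed: Replaces A's backward index loop with an arity counter and a previous-operator flag by a recursive-descent consumer that eats one complete RPN subexpression off the reversed token list and splits at the remaining suffix.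
-- outside the precondition, e.g. on get_args_for_operations([]): A returns (), B returns ()
import Mathlib
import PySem

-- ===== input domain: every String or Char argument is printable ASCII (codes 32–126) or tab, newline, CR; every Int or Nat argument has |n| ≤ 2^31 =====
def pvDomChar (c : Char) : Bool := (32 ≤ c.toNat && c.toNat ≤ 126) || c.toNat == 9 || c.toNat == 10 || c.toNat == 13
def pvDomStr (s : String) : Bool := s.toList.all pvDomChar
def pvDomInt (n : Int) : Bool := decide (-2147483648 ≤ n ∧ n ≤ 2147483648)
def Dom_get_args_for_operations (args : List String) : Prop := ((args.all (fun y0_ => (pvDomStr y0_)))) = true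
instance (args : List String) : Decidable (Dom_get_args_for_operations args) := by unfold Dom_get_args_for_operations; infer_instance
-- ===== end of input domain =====

-- B replaces A's backward counter loop by a recursive-descent consumer of one
-- RPN subexpression over the reversed token list (objective: alternative decomposition).

-- ===== PORT A =====
def operationsA : List String := ["+", "-", "*", "/", "^", "sin", "cos", "log", "ln", "tg", "ctg",
  "arcsin", "arccos", "arctg", "arcctg", "(", ")"]

def bin_funcA : List String := ["+", "-", "*", "/", "^", "log"]

-- the 'for i in range(2, len(args)+1)' loop with its break, returning index_of_second_operand
def aLoop (args : List String) (rng : List Int) (n : Int) (flag : Bool) : Int :=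
  match rng with
  | [] => 0
  | i :: rng' =>
    let t := PySem.List.pyGetD args (-i) ""   -- args[-i]; exact: 2 ≤ i ≤ len(args) on every call
    if t ∈ operationsA then
      let n1 := if flag then n - 1 else n
      let n2 := n1 + (if t ∈ bin_funcA then 2 else 1)
      if n2 = 0 then -i else aLoop args rng' n2 true
    else
      if n = 0 then -i
      else
        let n2 := n - 1
        if n2 = 0 then -i else aLoop args rng' n2 flag

def get_args_for_operations (args : List String) : List String × List String × String :=
  if args = [] then ([], [], "")   -- Python returns the bare list [] here; excluded by Pre_
  else
    let s := aLoop args (PySem.List.pyRange 2 ((args.length : Int) + 1) 1) 0 false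
    (PySem.List.slice args none (some s),
     PySem.List.slice args (some s) (some (-1)),
     PySem.List.pyGetD args (-1) "")

-- ===== PORT B =====
-- consume one complete RPN subexpression from the front of the reversed stream;
-- some = the remaining suffix, none = the stream ran out first
def consume (ts : List String) : Option {r : List String // r.length < ts.length} :=
  match ts with
  | [] => none
  | t :: tail =>
    if t ∈ operationsA then
      match consume tail with
      | none => none
      | some r =>
        if t ∈ bin_funcA then
          match consume r.val with
          | none => none
          | some r2 => some ⟨r2.val, by
              have h1 := r.property; have h2 := r2.property
              simp only [List.length_cons]; omega⟩
        else some ⟨r.val, by have h1 := r.property; simp only [List.length_cons]; omega⟩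
    else some ⟨tail, by simp⟩
termination_by ts.length
decreasing_by
  · simp
  · have h1 := r.property; simp only [List.length_cons]; omega

def get_args_for_operations_alt (args : List String) : List String × List String × String :=
  if args = [] then ([], [], "")   -- Python B returns the bare list [] here; excluded by Pre_
  else
    match args.reverse with       -- rev[0] = last, rev[1:] = rest
    | [] => ([], [], "")          -- unreachable: args ≠ []
    | last :: rest =>
      let r : List String := match consume rest with | none => [] | some r => r.val
      let k := rest.length - r.length
      (r.reverse, (rest.take k).reverse, last)

-- ===== PRECONDITION & SPEC =====
-- Pre_ excludes only the empty list, on which A returns the bare list [] — not a value of the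
-- declared (list, list, str) triple type.
def Pre_get_args_for_operations (args : List String) : Prop := args ≠ []
instance (args : List String) : Decidable (Pre_get_args_for_operations args) := by
  unfold Pre_get_args_for_operations; infer_instance

def pvWitness_get_args_for_operations : List String := ["x", "y", "+"]

def Spec_get_args_for_operations (args : List String) (out : List String × List String × String) : Prop := out = get_args_for_operations_alt args
instance (args : List String) (out : List String × List String × String) : Decidable (Spec_get_args_for_operations args out) := by unfold Spec_get_args_for_operations; infer_instance

-- ===== CLAIM (what is proved, stated in full; the proofs are below) =====
def Claim_equal_get_args_for_operations : Prop := ∀ (args : List String), Dom_get_args_for_operations args → Pre_get_args_for_operations args → Spec_get_args_for_operations args (get_args_for_operations args)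

-- ===== LEMMAS AND PROOFS =====

-- proof-side plain-Option view of consume
def consumeO (ts : List String) : Option (List String) := (consume ts).map Subtype.val

-- iterate consumeO k times
def consumeK : Nat → List String → Option (List String)
  | 0, ts => some ts
  | k+1, ts => (consumeO ts).bind (consumeK k)

theorem consumeO_nil : consumeO [] = none := by simp [consumeO, consume]

theorem consumeO_operand {t : String} (tail : List String) (h : t ∉ operationsA) :
    consumeO (t :: tail) = some tail := by
  simp [consumeO, consume, h]

theorem consumeO_op_un {t : String} (tail : List String) (h : t ∈ operationsA)
    (h2 : t ∉ bin_funcA) : consumeO (t :: tail) = consumeO tail := by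
  rw [consumeO, consume]
  cases hc : consume tail <;> simp [h, h2, consumeO, hc]

theorem consumeO_op_bin {t : String} (tail : List String) (h : t ∈ operationsA)
    (h2 : t ∈ bin_funcA) : consumeO (t :: tail) = (consumeO tail).bind consumeO := by
  rw [consumeO, consume]
  cases hc : consume tail
  · simp [h, h2, consumeO, hc]
  · rename_i r
    cases hc2 : consume r.val <;> simp [h, h2, consumeO, hc, hc2]

theorem consumeK_one (ts : List String) : consumeK 1 ts = consumeO ts := by
  cases h : consumeO ts <;> simp [consumeK, h]

theorem consumeK_add (a b : Nat) (ts : List String) :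
    consumeK (a + b) ts = (consumeK a ts).bind (consumeK b) := by
  induction a generalizing ts with
  | zero => simp [consumeK]
  | succ a ih =>
    have : a + 1 + b = (a + b) + 1 := by omega
    rw [this, consumeK, consumeK]
    cases h : consumeO ts <;> simp [h, ih]

theorem consumeO_op {t : String} (tail : List String) (h : t ∈ operationsA) :
    consumeO (t :: tail) = consumeK (if t ∈ bin_funcA then 2 else 1) tail := by
  by_cases h2 : t ∈ bin_funcA
  · rw [consumeO_op_bin tail h h2]
    simp only [h2, if_true]
    show _ = consumeK (1 + 1) tail
    rw [consumeK_add, consumeK_one]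
    cases hc : consumeO tail <;> simp [consumeK_one]
  · rw [consumeO_op_un tail h h2]
    simp [h2, consumeK_one]

theorem consumeO_suffix : ∀ (ts r : List String), consumeO ts = some r → r <:+ ts := by
  intro ts
  induction ts using consume.induct with
  | case1 => intro r h; simp [consumeO_nil] at h
  | case2 t tail h hc =>
    intro r h'
    rw [consumeO, consume] at h'
    simp [h, hc] at h'
  | case3 t tail h r0 hc h2 hc2 ih1 ih2 =>
    intro r h'
    rw [consumeO, consume] at h'
    simp [h, h2, hc, hc2] at h'
  | case4 t tail h r0 hc h2 r2 hc2 ih1 ih2 =>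
    intro r h'
    rw [consumeO, consume] at h'
    simp only [h, if_true, hc, h2, hc2] at h'
    simp only [Option.map_some] at h'
    have e1 : r0.val <:+ tail := ih1 r0.val (by simp [consumeO, hc])
    have e2 : r2.val <:+ r0.val := ih2 r2.val (by simp [consumeO, hc2])
    have : r = r2.val := by simpa using h'.symm
    subst this
    exact (e2.trans e1).trans (List.suffix_cons t tail)
  | case5 t tail h r0 hc h2 ih1 =>
    intro r h'
    rw [consumeO, consume] at h'
    simp only [h, if_true, hc, h2, if_false, Option.map_some] at h'
    have e1 : r0.val <:+ tail := ih1 r0.val (by simp [consumeO, hc])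
    have : r = r0.val := by simpa using h'.symm
    subst this
    exact e1.trans (List.suffix_cons t tail)
  | case6 t tail h =>
    intro r h'
    rw [consumeO_operand tail h] at h'
    have : r = tail := by simpa using h'.symm
    rw [this]
    exact List.suffix_cons t tail

-- the central invariant of A's loop: with the flag set the counter n counts the
-- subexpressions still to consume; the loop stops exactly where consumeK does
theorem aLoop_spec : ∀ (ts pre args : List String) (i : Nat) (n : Int) (flag : Bool),
    2 ≤ i → pre.length = i - 1 → args.reverse = pre ++ ts →
    (flag = false → n = 0) → (flag = true → 1 ≤ n) →
    aLoop args (PySem.List.pyRange (i : Int) ((args.length : Int) + 1) 1) n flag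
      = match consumeK (if flag then n.toNat else 1) ts with
        | some r => -((i : Int) - 1 + ((ts.length : Int) - (r.length : Int)))
        | none => 0 := by
  intro ts
  induction ts with
  | nil =>
    intro pre args i n flag h2 hpre hrev hf ht
    have hL : args.length = pre.length := by
      have := congrArg List.length hrev; simpa using this
    have hnil : PySem.List.pyRange (i : Int) ((args.length : Int) + 1) 1 = [] := by
      apply PySem.List.pyRange_one_eq_nil
      omega
    rw [hnil]
    obtain ⟨m, hm⟩ : ∃ m, (if flag then n.toNat else 1) = m + 1 := by
      cases flag
      · exact ⟨0, by simp⟩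
      · have := ht rfl; exact ⟨n.toNat - 1, by simp; omega⟩
    rw [hm]
    simp [aLoop, consumeK, consumeO_nil]
  | cons t tail ih =>
    intro pre args i n flag h2 hpre hrev hf ht
    have hL : args.length = pre.length + (tail.length + 1) := by
      have := congrArg List.length hrev; simpa using this
    have hiL : i ≤ args.length := by omega
    have hargs : args = tail.reverse ++ t :: pre.reverse := by
      have := congrArg List.reverse hrev
      simpa using this
    have hget : PySem.List.pyGetD args (-(i : Int)) "" = t := by
      rw [PySem.List.pyGetD_neg_natCast args i "" (by omega) hiL]
      rw [← Option.some_inj, ← List.getElem?_eq_getElem]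
      rw [hargs]
      have hidx : (tail.reverse ++ t :: pre.reverse).length - i = tail.reverse.length := by
        simp; omega
      rw [hidx, List.getElem?_append_right (le_refl _)]
      simp
    have hcons : PySem.List.pyRange (i : Int) ((args.length : Int) + 1) 1
        = (i : Int) :: PySem.List.pyRange ((i : Int) + 1) ((args.length : Int) + 1) 1 := by
      apply PySem.List.pyRange_one_cons
      omega
    rw [hcons, aLoop]
    simp only [hget]
    -- count ≥ 1
    obtain ⟨c, hc, hcval⟩ : ∃ c, (if flag then n.toNat else 1) = c + 1 ∧
        (c : Int) = (if flag then n - 1 else 0) := by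
      cases flag
      · exact ⟨0, by simp, by simp⟩
      · have := ht rfl
        exact ⟨n.toNat - 1, by simp; omega, by simp; omega⟩
    rw [hc, consumeK]
    have hrev' : args.reverse = (pre ++ [t]) ++ tail := by rw [hrev]; simp
    have hcast : ((i : Int) + 1) = ((i + 1 : Nat) : Int) := by push_cast; ring
    by_cases hop : t ∈ operationsA
    · -- operator token
      simp only [if_pos hop]
      have hn2pos : (1 : Int) ≤ (if flag then n - 1 else n) + (if t ∈ bin_funcA then 2 else 1) := by
        cases flag
        · have := hf rfl
          simp only [Bool.false_eq_true, if_false]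
          split_ifs <;> omega
        · have := ht rfl
          simp only [eq_self_iff_true, if_true]
          split_ifs <;> omega
      rw [if_neg (by omega)]
      rw [consumeO_op tail hop]
      rw [← consumeK_add]
      have hKeq : (if t ∈ bin_funcA then 2 else 1) + c
          = ((if flag then n - 1 else n) + (if t ∈ bin_funcA then (2:Int) else 1)).toNat := by
        cases flag
        · have h0 := hf rfl
          by_cases hbin : t ∈ bin_funcA <;> simp [hbin] at hcval ⊢ <;> omega
        · have h0 := ht rfl
          by_cases hbin : t ∈ bin_funcA <;> simp [hbin] at hcval ⊢ <;> omega
      rw [hKeq, hcast]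
      have hIH := ih (pre ++ [t]) args (i+1)
        ((if flag then n - 1 else n) + (if t ∈ bin_funcA then (2:Int) else 1)) true
        (by omega) (by simp; omega) hrev' (by intro h; cases h) (by intro _; exact hn2pos)
      simp only [eq_self_iff_true, if_true] at hIH
      rw [hIH]
      cases hres : consumeK ((if flag then n - 1 else n) + (if t ∈ bin_funcA then (2:Int) else 1)).toNat tail with
      | none => rfl
      | some r =>
        show -(((i:Nat) + 1 : Nat) - 1 + ((tail.length : Int) - (r.length : Int)))
          = -((i:Int) - 1 + (((t :: tail).length : Int) - (r.length : Int)))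
        simp only [List.length_cons]; push_cast; ring
    · -- operand token
      simp only [if_neg hop]
      rw [consumeO_operand tail hop]
      simp only [Option.bind_some]
      rcases Nat.eq_zero_or_pos c with hc0 | hcpos
      · -- this operand completes the subexpression: the loop breaks at -i
        subst hc0
        have : (if n = 0 then -(i:Int) else if n - 1 = 0 then -(i:Int) else
            aLoop args (PySem.List.pyRange ((i:Int)+1) ((args.length : Int) + 1) 1) (n-1) flag)
            = -(i:Int) := by
          cases flag
          · have := hf rfl; rw [if_pos this]
          · have := ht rfl
            have hn1 : n = 1 := by simp at hcval; omega
            rw [if_neg (by omega), if_pos (by omega)]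
        rw [this]
        simp only [consumeK, List.length_cons]
        push_cast
        ring
      · -- more operands still needed: recurse with n - 1
        have hflag : flag = true := by
          cases flag
          · simp at hcval; omega
          · rfl
        subst hflag
        have hn := ht rfl
        have hngt : 2 ≤ n := by simp at hcval; omega
        rw [if_neg (by omega), if_neg (by omega)]
        have hcn : c = (n - 1).toNat := by simp at hcval; omega
        rw [hcast, hcn]
        have hIH := ih (pre ++ [t]) args (i+1) (n-1) true
          (by omega) (by simp; omega) hrev' (by intro h; cases h) (by intro _; omega)
        simp only [eq_self_iff_true, if_true] at hIH
        rw [hIH]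
        cases hres : consumeK (n-1).toNat tail with
        | none => rfl
        | some r =>
          show -(((i:Nat) + 1 : Nat) - 1 + ((tail.length : Int) - (r.length : Int)))
            = -((i:Int) - 1 + (((t :: tail).length : Int) - (r.length : Int)))
          simp only [List.length_cons]; push_cast; ring

-- ===== VERDICT (by name: the statement is the Claim_ definition above) =====
theorem get_args_for_operations_spec : Claim_equal_get_args_for_operations := by
  unfold Claim_equal_get_args_for_operations
  intro args _hdom hpre
  unfold Pre_get_args_for_operations at hpre
  unfold Spec_get_args_for_operations
  cases hrev : args.reverse with
  | nil =>
    exact absurd (by simpa using congrArg List.reverse hrev) hpre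
  | cons last rest =>
    have hargs : args = rest.reverse ++ [last] := by
      have := congrArg List.reverse hrev; simpa using this
    have hLen : args.length = rest.length + 1 := by rw [hargs]; simp
    have hs := aLoop_spec rest [last] args 2 0 false (le_refl 2) (by simp)
      (by rw [hrev]; rfl) (fun _ => rfl) (by intro h; cases h)
    simp only [Bool.false_eq_true, if_false, Nat.cast_ofNat] at hs
    rw [consumeK_one] at hs
    simp only [get_args_for_operations, get_args_for_operations_alt, if_neg hpre, hrev]
    cases hcon : consume rest with
    | none =>
      have hO : consumeO rest = none := by simp [consumeO, hcon]
      rw [hO] at hs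
      rw [hs]
      simp only [Prod.mk.injEq]
      refine ⟨?_, ?_, ?_⟩
      · rw [PySem.List.slice_to args (le_refl (0:Int))]
        simp
      · rw [PySem.List.slice_zero_start, PySem.List.slice_to_neg_one]
        rw [hargs]
        simp [List.dropLast_concat]
      · rw [hargs, PySem.List.pyGetD_neg_one_append_singleton]
    | some r =>
      obtain ⟨rv, hlt⟩ := r
      have hO : consumeO rest = some rv := by simp [consumeO, hcon]
      rw [hO] at hs
      obtain ⟨p, hp⟩ := consumeO_suffix rest rv hO
      have hplen : p.length + rv.length = rest.length := by rw [← hp]; simp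
      have hsval : aLoop args (PySem.List.pyRange 2 ((args.length : Int) + 1) 1) 0 false
          = -(((p.length + 1 : Nat)) : Int) := by
        rw [hs]
        show -((2 : Int) - 1 + ((rest.length : Int) - (rv.length : Int))) = _
        push_cast; omega
      rw [hsval]
      show (PySem.List.slice args none (some (-(((p.length + 1 : Nat)) : Int))),
            PySem.List.slice args (some (-(((p.length + 1 : Nat)) : Int))) (some (-1)),
            PySem.List.pyGetD args (-1) "")
          = (rv.reverse, (List.take (rest.length - rv.length) rest).reverse, last)
      have hargs2 : args = rv.reverse ++ (p.reverse ++ [last]) := by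
        rw [hargs, ← hp]; simp
      simp only [Prod.mk.injEq]
      refine ⟨?_, ?_, ?_⟩
      · rw [PySem.List.slice_to_neg_natCast args (p.length + 1) (by omega)]
        have hidx : args.length - (p.length + 1) = rv.length := by omega
        rw [hidx, hargs2, List.take_left' (by simp)]
      · have e1 : PySem.List.clampIdx args.length (-((p.length + 1 : Nat) : Int))
            = rv.length := by
          rw [PySem.List.clampIdx_neg_natCast _ _ (by omega)]
          omega
        have e2 : PySem.List.clampIdx args.length (-1) = rv.length + p.length := by
          rw [PySem.List.clampIdx_neg_one]
          omega
        have hk : rest.length - rv.length = p.length := by omega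
        rw [hk, ← hp, List.take_left]
        simp only [PySem.List.slice, e1, e2]
        rw [hargs2, List.drop_left' (by simp)]
        have : rv.length + p.length - rv.length = p.length := by omega
        rw [this, List.take_left' (by simp)]
      · rw [hargs, PySem.List.pyGetD_neg_one_append_singleton]
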